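-- pv_equiv track=rewrite | github.com/RD2P/advent_of_code_2024 | day2/day2.py | check
-- ===== SOURCE A (Python) =====
-- def check(l):
--   # check duplicates
--   for n in l:
--     if l.count(n) > 1:
--       return False
--
--   # check rapid change
--   for i in range(1, len(l)):
--     if abs(l[i] - l[i-1]) > 3:
--       return False
--
--   # check increasing/decreasing consistency
--   if l[1] - l[0] > 0:
--     for i in range(1,len(l)):
--       if l[i] - l[i-1] < 0:
--         return False
--   else:
--     for i in range(1,len(l)):
--       if l[i] - l[i-1] > 0:
--         return False
--
--   return True
-- ===== SOURCE B (Python) =====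
-- def check(l):
--     # pick the allowed step range from the sign of the first difference
--     lo, hi = (1, 3) if l[1] - l[0] > 0 else (-3, -1)
--     return all(lo <= b - a <= hi for a, b in zip(l, l[1:]))
-- ===== Notes on version B (the rewrite author's own statement) =====
-- stated objective: simpler
-- what changed: Replaced A's three scans (a quadratic count-based duplicate pass plus two index loops for step size and direction) by a single linear pass over adjacent pairs against the step range 1..3 or -3..-1 chosen from the sign of the first difference; the explicit duplicate check disappears since a zero step is outside either range.
import Mathlib
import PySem

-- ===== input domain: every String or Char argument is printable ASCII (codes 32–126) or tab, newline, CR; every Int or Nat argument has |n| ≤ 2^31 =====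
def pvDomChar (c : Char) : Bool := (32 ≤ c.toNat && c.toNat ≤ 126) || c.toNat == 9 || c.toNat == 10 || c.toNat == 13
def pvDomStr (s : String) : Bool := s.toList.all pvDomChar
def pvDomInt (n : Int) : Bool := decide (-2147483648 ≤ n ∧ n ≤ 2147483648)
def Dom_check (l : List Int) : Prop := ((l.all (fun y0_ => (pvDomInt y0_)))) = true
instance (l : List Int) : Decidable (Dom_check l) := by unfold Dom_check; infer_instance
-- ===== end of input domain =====

-- B replaces A's three scans (duplicate check via count, step-size loop, direction loop)
-- by one pass over adjacent pairs against the step range (1..3 or -3..-1) chosen from the first difference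
-- (objective: simpler).

-- ===== PORT A =====
-- literal port of A; element reads go via pyGetD: Python raises IndexError reading
-- the second element when the list is shorter than 2, which Pre_check excludes; loop indices are always in range.
def check (l : List Int) : Bool :=
  if l.any (fun n => PySem.List.count l n > 1) then false
  else if (PySem.List.pyRange 1 l.length 1).any (fun i =>
      |PySem.List.pyGetD l i 0 - PySem.List.pyGetD l (i-1) 0| > 3) then false
  else if PySem.List.pyGetD l 1 0 - PySem.List.pyGetD l 0 0 > 0 then
    !(PySem.List.pyRange 1 l.length 1).any (fun i =>
      PySem.List.pyGetD l i 0 - PySem.List.pyGetD l (i-1) 0 < 0)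
  else
    !(PySem.List.pyRange 1 l.length 1).any (fun i =>
      PySem.List.pyGetD l i 0 - PySem.List.pyGetD l (i-1) 0 > 0)

-- ===== PORT B =====
def check_alt (l : List Int) : Bool :=
  let lohi : Int × Int :=
    if PySem.List.pyGetD l 1 0 - PySem.List.pyGetD l 0 0 > 0 then (1, 3) else (-3, -1)
  (l.zip (PySem.List.slice l (some 1) none)).all
    (fun p => decide (lohi.1 ≤ p.2 - p.1) && decide (p.2 - p.1 ≤ lohi.2))

-- ===== PRECONDITION & SPEC =====
-- Pre_ excludes lists of length < 2, on which A raises IndexError reading the second element (B raises too).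
def Pre_check (l : List Int) : Prop := 2 ≤ l.length
instance (l : List Int) : Decidable (Pre_check l) := by unfold Pre_check; infer_instance
def pvWitness_check : List Int := [1, 2, 4]

def Spec_check (l : List Int) (out : Bool) : Prop := out = check_alt l
instance (l : List Int) (out : Bool) : Decidable (Spec_check l out) := by unfold Spec_check; infer_instance

-- ===== CLAIM (what is proved, stated in full; the proofs are below) =====
def Claim_equal_check : Prop := ∀ (l : List Int), Dom_check l → Pre_check l → Spec_check l (check l)

-- ===== LEMMAS AND PROOFS =====

-- A's index loops range over the adjacent pairs (l[k], l[k+1])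
theorem pyRange_exists (l : List Int) (P : Int → Int → Bool) :
    ((PySem.List.pyRange 1 l.length 1).any (fun i =>
        P (PySem.List.pyGetD l (i-1) 0) (PySem.List.pyGetD l i 0))) = true
      ↔ ∃ k : Nat, k + 1 < l.length ∧ P (l.getD k 0) (l.getD (k+1) 0) = true := by
  simp only [List.any_eq_true]
  constructor
  · rintro ⟨i, hi, hP⟩
    rw [PySem.List.mem_pyRange_one] at hi
    obtain ⟨k, rfl⟩ : ∃ k : Nat, i = (k:Int)+1 := ⟨(i-1).toNat, by omega⟩
    refine ⟨k, by exact_mod_cast hi.2, ?_⟩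
    have h1 : ((k:Int)+1) - 1 = (k:Int) := by ring
    rw [h1] at hP
    have h2 : ((k:Int)+1) = ((k+1 : Nat) : Int) := by push_cast; ring
    rw [h2, PySem.List.pyGetD_natCast, PySem.List.pyGetD_natCast] at hP
    exact hP
  · rintro ⟨k, hk, hP⟩
    refine ⟨(k:Int)+1, ?_, ?_⟩
    · rw [PySem.List.mem_pyRange_one]; omega
    · have h1 : ((k:Int)+1) - 1 = (k:Int) := by ring
      have h2 : ((k:Int)+1) = ((k+1 : Nat) : Int) := by push_cast; ring
      rw [h1, h2, PySem.List.pyGetD_natCast, PySem.List.pyGetD_natCast]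
      exact hP

-- B's zip pass ranges over the same adjacent pairs
theorem zip_forall (l : List Int) (P : Int → Int → Bool) :
    ((l.zip l.tail).all (fun p => P p.1 p.2)) = true
      ↔ ∀ k : Nat, k + 1 < l.length → P (l.getD k 0) (l.getD (k+1) 0) = true := by
  simp only [List.all_eq_true]
  constructor
  · intro h k hk
    have hlen : (l.zip l.tail).length = l.length - 1 := by simp
    have := h ((l.zip l.tail)[k]'(by omega)) (List.getElem_mem _)
    rw [List.getElem_zip] at this
    rw [List.getD_eq_getElem l 0 (by omega), List.getD_eq_getElem l 0 hk]
    simpa [List.getElem_tail] using this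
  · intro h p hp
    obtain ⟨k, hk, hkp⟩ := List.getElem_of_mem hp
    have hlen : (l.zip l.tail).length = l.length - 1 := by simp
    have hk1 : k + 1 < l.length := by omega
    have := h k hk1
    rw [List.getD_eq_getElem l 0 (by omega), List.getD_eq_getElem l 0 hk1] at this
    rw [List.getElem_zip] at hkp
    rw [← hkp]
    simpa [List.getElem_tail] using this

-- no duplicates ⇔ every adjacent pair would be distinct, given adjacent monotone steps;
-- direction 1: Nodup gives adjacent getD values distinct
theorem nodup_adj_ne {l : List Int} (h : l.Nodup) :
    ∀ k : Nat, k + 1 < l.length → l.getD k 0 ≠ l.getD (k+1) 0 := by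
  intro k hk
  rw [List.getD_eq_getElem l 0 (by omega), List.getD_eq_getElem l 0 hk]
  intro he
  have := (List.Nodup.getElem_inj_iff h).mp he
  omega

-- direction 2: strictly monotone adjacent steps give Nodup
theorem adj_lt_nodup {l : List Int}
    (h : ∀ k : Nat, k + 1 < l.length → l.getD k 0 < l.getD (k+1) 0) : l.Nodup := by
  have hc : List.IsChain (· < ·) l := by
    rw [List.isChain_iff_getElem]
    intro i hi
    have := h i hi
    rwa [List.getD_eq_getElem l 0 (by omega), List.getD_eq_getElem l 0 hi] at this
  exact (List.IsChain.pairwise hc).imp ne_of_lt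

theorem adj_gt_nodup {l : List Int}
    (h : ∀ k : Nat, k + 1 < l.length → l.getD (k+1) 0 < l.getD k 0) : l.Nodup := by
  have hc : List.IsChain (· > ·) l := by
    rw [List.isChain_iff_getElem]
    intro i hi
    have := h i hi
    rwa [List.getD_eq_getElem l 0 hi, List.getD_eq_getElem l 0 (by omega)] at this
  exact (List.IsChain.pairwise hc).imp ne_of_gt

-- the duplicate pass of A decides Nodup
theorem any_count_iff (l : List Int) :
    (l.any (fun n => PySem.List.count l n > 1)) = false ↔ l.Nodup := by
  rw [List.nodup_iff_count_le_one]
  simp only [List.any_eq_false, PySem.List.count_eq, decide_eq_true_eq, not_lt]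
  constructor
  · intro h a
    by_cases ha : a ∈ l
    · exact h a ha
    · simp [List.count_eq_zero_of_not_mem ha]
  · intro h a _
    exact h a

-- ===== VERDICT (by name: the statement is the Claim_ definition above) =====
theorem check_spec : Claim_equal_check := by
  unfold Claim_equal_check
  intro l _ hpre
  unfold Spec_check
  have hpre' : 2 ≤ l.length := hpre
  have htail : PySem.List.slice l (some 1) none = l.tail := PySem.List.slice_from_one l
  have hd1 : PySem.List.pyGetD l 1 0 = l.getD 1 0 := by
    exact_mod_cast PySem.List.pyGetD_natCast l 1 0
  have hd0 : PySem.List.pyGetD l 0 0 = l.getD 0 0 := by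
    exact_mod_cast PySem.List.pyGetD_natCast l 0 0
  rw [Bool.eq_iff_iff]
  unfold check check_alt
  rw [htail, hd1, hd0]
  -- prop-level characterizations of every scan
  have hDup : (l.any (fun n => PySem.List.count l n > 1)) = true ↔ ¬ l.Nodup := by
    rw [← any_count_iff l]
    cases (l.any (fun n => PySem.List.count l n > 1)) <;> simp
  have hAbs : ((PySem.List.pyRange 1 l.length 1).any (fun i =>
      |PySem.List.pyGetD l i 0 - PySem.List.pyGetD l (i-1) 0| > 3)) = true
      ↔ ∃ k : Nat, k + 1 < l.length ∧ 3 < |l.getD (k+1) 0 - l.getD k 0| := by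
    have := pyRange_exists l (fun a b => decide (|b - a| > 3))
    simpa using this
  have hNeg : ((PySem.List.pyRange 1 l.length 1).any (fun i =>
      PySem.List.pyGetD l i 0 - PySem.List.pyGetD l (i-1) 0 < 0)) = true
      ↔ ∃ k : Nat, k + 1 < l.length ∧ l.getD (k+1) 0 - l.getD k 0 < 0 := by
    have := pyRange_exists l (fun a b => decide (b - a < 0))
    simpa using this
  have hPos : ((PySem.List.pyRange 1 l.length 1).any (fun i =>
      PySem.List.pyGetD l i 0 - PySem.List.pyGetD l (i-1) 0 > 0)) = true
      ↔ ∃ k : Nat, k + 1 < l.length ∧ 0 < l.getD (k+1) 0 - l.getD k 0 := by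
    have := pyRange_exists l (fun a b => decide (b - a > 0))
    simpa using this
  have hB : ∀ lo hi : Int, ((l.zip l.tail).all
      (fun p => decide (lo ≤ p.2 - p.1) && decide (p.2 - p.1 ≤ hi))) = true
      ↔ ∀ k : Nat, k + 1 < l.length →
          lo ≤ l.getD (k+1) 0 - l.getD k 0 ∧ l.getD (k+1) 0 - l.getD k 0 ≤ hi := by
    intro lo hi
    have := zip_forall l (fun a b => decide (lo ≤ b - a) && decide (b - a ≤ hi))
    simpa using this
  by_cases hd : l.getD 1 0 - l.getD 0 0 > 0
  · simp only [if_pos hd]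
    show _ ↔ ((l.zip l.tail).all
      (fun p => decide ((1:Int) ≤ p.2 - p.1) && decide (p.2 - p.1 ≤ (3:Int)))) = true
    rw [hB 1 3]
    by_cases hdup : (l.any (fun n => PySem.List.count l n > 1)) = true
    · rw [if_pos hdup]
      simp only [Bool.false_eq_true, false_iff]
      intro hBv
      exact (hDup.mp hdup) (adj_lt_nodup (fun k hk => by have := hBv k hk; omega))
    · rw [if_neg hdup]
      have hnd : l.Nodup := (any_count_iff l).mp (Bool.eq_false_iff.mpr hdup)
      have hne := nodup_adj_ne hnd
      by_cases habs : ((PySem.List.pyRange 1 l.length 1).any (fun i =>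
          |PySem.List.pyGetD l i 0 - PySem.List.pyGetD l (i-1) 0| > 3)) = true
      · rw [if_pos habs]
        simp only [Bool.false_eq_true, false_iff]
        intro hBv
        obtain ⟨k, hk, h3⟩ := hAbs.mp habs
        have := hBv k hk
        have h3' := abs_lt.mpr (by omega : -4 < l.getD (k+1) 0 - l.getD k 0 ∧ l.getD (k+1) 0 - l.getD k 0 < 4)
        omega
      · rw [if_neg habs]
        have habs' : ∀ k : Nat, k + 1 < l.length → |l.getD (k+1) 0 - l.getD k 0| ≤ 3 := by
          intro k hk
          by_contra hc
          exact habs (hAbs.mpr ⟨k, hk, by omega⟩)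
        rw [Bool.not_eq_true', Bool.eq_false_iff, ne_eq, hNeg]
        constructor
        · intro hA k hk
          have h3 := abs_le.mp (habs' k hk)
          have hne' := hne k hk
          have h0 : ¬ (l.getD (k+1) 0 - l.getD k 0 < 0) := fun hlt => hA ⟨k, hk, hlt⟩
          omega
        · rintro hBv ⟨k, hk, hlt⟩
          have := hBv k hk
          omega
  · simp only [if_neg hd]
    show _ ↔ ((l.zip l.tail).all
      (fun p => decide ((-3:Int) ≤ p.2 - p.1) && decide (p.2 - p.1 ≤ (-1:Int)))) = true
    rw [hB (-3) (-1)]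
    by_cases hdup : (l.any (fun n => PySem.List.count l n > 1)) = true
    · rw [if_pos hdup]
      simp only [Bool.false_eq_true, false_iff]
      intro hBv
      exact (hDup.mp hdup) (adj_gt_nodup (fun k hk => by have := hBv k hk; omega))
    · rw [if_neg hdup]
      have hnd : l.Nodup := (any_count_iff l).mp (Bool.eq_false_iff.mpr hdup)
      have hne := nodup_adj_ne hnd
      by_cases habs : ((PySem.List.pyRange 1 l.length 1).any (fun i =>
          |PySem.List.pyGetD l i 0 - PySem.List.pyGetD l (i-1) 0| > 3)) = true
      · rw [if_pos habs]
        simp only [Bool.false_eq_true, false_iff]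
        intro hBv
        obtain ⟨k, hk, h3⟩ := hAbs.mp habs
        have := hBv k hk
        have h3' := abs_lt.mpr (by omega : -4 < l.getD (k+1) 0 - l.getD k 0 ∧ l.getD (k+1) 0 - l.getD k 0 < 4)
        omega
      · rw [if_neg habs]
        have habs' : ∀ k : Nat, k + 1 < l.length → |l.getD (k+1) 0 - l.getD k 0| ≤ 3 := by
          intro k hk
          by_contra hc
          exact habs (hAbs.mpr ⟨k, hk, by omega⟩)
        rw [Bool.not_eq_true', Bool.eq_false_iff, ne_eq, hPos]
        constructor
        · intro hA k hk
          have h3 := abs_le.mp (habs' k hk)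
          have hne' := hne k hk
          have h0 : ¬ (0 < l.getD (k+1) 0 - l.getD k 0) := fun hlt => hA ⟨k, hk, hlt⟩
          omega
        · rintro hBv ⟨k, hk, hlt⟩
          have := hBv k hk
          omega
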